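-- pv_equiv track=rewrite | github.com/ghkdxodn84-oss/KORStockScan | src/engine/daily_threshold_cycle_report.py | _parse_action_list
-- ===== SOURCE A (Python) =====
-- from typing import Any, Callable
--
-- def _parse_action_list(value: Any) -> list[str]:
--     if value in (None, "", "-", "None"):
--         return []
--     if isinstance(value, (list, tuple, set)):
--         raw_tokens = [str(item) for item in value]
--     else:
--         raw_tokens = str(value).replace(",", "|").split("|")
--     actions: list[str] = []
--     seen: set[str] = set()
--     for raw_token in raw_tokens:
--         token = str(raw_token or "").strip()
--         if not token or token in {"-", "None"}:
--             continue
--         action = token.split(":", 1)[0].strip()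
--         if not action or action in seen:
--             continue
--         seen.add(action)
--         actions.append(action)
--     return actions
-- ===== SOURCE B (Python) =====
-- def _parse_action_list(value):
--     if value in (None, "", "-", "None"):
--         return []
--     if isinstance(value, (list, tuple, set)):
--         segments = [str(item) for item in value]
--     else:
--         segments = []
--         buf = []
--         for ch in str(value):
--             if ch in ",|":
--                 segments.append("".join(buf))
--                 buf = []
--             else:
--                 buf.append(ch)
--         segments.append("".join(buf))
--     candidates = []
--     for seg in segments:
--         token = seg.strip()
--         if token not in ("", "-", "None"):
--             action = token.partition(":")[0].strip()
--             if action: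
--                 candidates.append(action)
--     return _dedup(candidates)
--
--
-- def _dedup(xs):
--     if not xs:
--         return []
--     head = xs[0]
--     return [head] + _dedup([x for x in xs[1:] if x != head])
-- ===== Notes on version B (the rewrite author's own statement) =====
-- stated objective: alternative
-- what changed: B tokenizes with a single character-level scanner (explicit buffer) instead of replace(',','|')+split('|'), takes the action head with str.partition instead of split(':',1)[0], and deduplicates by recursive removal of later duplicates instead of an incremental seen-set.
import Mathlib
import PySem

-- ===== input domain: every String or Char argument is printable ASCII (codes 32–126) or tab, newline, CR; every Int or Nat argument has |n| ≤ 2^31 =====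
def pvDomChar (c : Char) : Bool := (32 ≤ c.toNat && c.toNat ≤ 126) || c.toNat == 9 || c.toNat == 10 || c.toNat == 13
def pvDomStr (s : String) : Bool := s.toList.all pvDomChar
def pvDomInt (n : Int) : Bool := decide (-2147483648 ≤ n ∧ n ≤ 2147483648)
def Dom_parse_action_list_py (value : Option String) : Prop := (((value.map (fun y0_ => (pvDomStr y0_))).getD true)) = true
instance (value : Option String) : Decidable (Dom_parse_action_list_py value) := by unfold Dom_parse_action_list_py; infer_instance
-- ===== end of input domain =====

-- B tokenizes with one character-level scanner instead of replace+split, takes the action head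
-- with partition instead of split(':',1), and deduplicates by recursive removal of later
-- duplicates instead of a seen-set (objective: alternative).

-- ===== PORT A =====
-- token.split(":", 1)[0].strip() — ":" ≠ "" so splitMax? is some, and split never yields [],
-- so the [0] (ported via pyGet?, with unreachable getD defaults) cannot raise
def pvActionOf (token : String) : String :=
  PySem.Str.strip ((PySem.List.pyGet? ((PySem.Str.splitMax? token ":" 1).getD []) 0).getD "")

-- the body of A's for-loop (actions, seen as the pair state)
def pvStepA (st : List String × PySem.Set String) (rawToken : String) : List String × PySem.Set String :=
  let token := PySem.Str.strip rawToken
  if token = "" ∨ token = "-" ∨ token = "None" then st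
  else
    let action := pvActionOf token
    if action = "" ∨ PySem.Set.contains st.2 action then st
    else (st.1 ++ [action], PySem.Set.add st.2 action)

def parse_action_list_py (value : Option String) : List String :=
  match value with
  | none => []
  | some s =>
    if s = "" ∨ s = "-" ∨ s = "None" then []
    else
      -- str(value).replace(",", "|").split("|"); "|" ≠ "" so split? is some (getD unreachable)
      let rawTokens := (PySem.Str.split? (PySem.Str.replace s "," "|") "|").getD []
      (rawTokens.foldl pvStepA ([], PySem.Set.empty)).1

-- ===== PORT B =====
-- body of B's character loop: state = (finished segments, current buffer)
def pvScanStep (st : List String × List Char) (ch : Char) : List String × List Char :=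
  if ch = ',' ∨ ch = '|' then (st.1 ++ [String.ofList st.2], [])
  else (st.1, st.2 ++ [ch])

-- token = seg.strip(); action = token.partition(":")[0].strip()
-- (partition(":")[0] is exactly the prefix before the first ':', i.e. takeWhile (· ≠ ':'))
def pvTokenAction (seg : String) : String × String :=
  let token := PySem.Str.strip seg
  (token, PySem.Str.strip (String.ofList (token.toList.takeWhile (· ≠ ':'))))

-- body of B's candidates loop
def pvCandStep (acc : List String) (seg : String) : List String :=
  let ta := pvTokenAction seg
  if ta.1 = "" ∨ ta.1 = "-" ∨ ta.1 = "None" then acc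
  else if ta.2 = "" then acc else acc ++ [ta.2]

-- _dedup: keep the head, delete its later duplicates, recurse
def pvDedup : List String → List String
  | [] => []
  | x :: xs => x :: pvDedup (xs.filter (fun y => y != x))
termination_by l => l.length
decreasing_by
  simp only [List.length_unattach, List.length_cons, Nat.lt_succ_iff]
  exact le_trans (List.length_filter_le _ _) (by simp)

def parse_action_list_py_alt (value : Option String) : List String :=
  match value with
  | none => []
  | some s =>
    if s = "" ∨ s = "-" ∨ s = "None" then []
    else
      let st := s.toList.foldl pvScanStep ([], [])
      let segments := st.1 ++ [String.ofList st.2]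
      let candidates := segments.foldl pvCandStep []
      pvDedup candidates

-- ===== PRECONDITION & SPEC =====
def Spec_parse_action_list_py (value : Option String) (out : List String) : Prop := out = parse_action_list_py_alt value
instance (value : Option String) (out : List String) : Decidable (Spec_parse_action_list_py value out) := by unfold Spec_parse_action_list_py; infer_instance

-- ===== CLAIM (what is proved, stated in full; the proofs are below) =====
def Claim_equal_parse_action_list_py : Prop := ∀ (value : Option String), Dom_parse_action_list_py value → Spec_parse_action_list_py value (parse_action_list_py value)

-- ===== LEMMAS AND PROOFS =====

-- the common splitting specification: segments of s delimited by ',' or '|'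
def pvSplitSpec : List Char → List (List Char)
  | [] => [[]]
  | c :: t => if c = ',' ∨ c = '|' then [] :: pvSplitSpec t else (pvSplitSpec t).modifyHead (c :: ·)

def pvSplit1 : List Char → List (List Char)
  | [] => [[]]
  | c :: t => if c = '|' then [] :: pvSplit1 t else (pvSplit1 t).modifyHead (c :: ·)

def pvMapC (c : Char) : Char := if c = ',' then '|' else c

theorem pvModMod (l : List (List Char)) (f g : List Char → List Char) :
    (l.modifyHead g).modifyHead f = l.modifyHead (fun x => f (g x)) := by cases l <;> rfl

theorem pvModId (l : List (List Char)) : l.modifyHead (fun x => x) = l := by cases l <;> rfl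

-- replace "," "|" is the character map pvMapC
theorem pvReplaceGo (fuel : Nat) : ∀ (l : List Char) (acc : List Char), l.length ≤ fuel →
    PySem.Chars.replace.go [','] ['|'] fuel l acc = acc.reverse ++ l.map pvMapC := by
  induction fuel with
  | zero =>
    intro l acc h
    have : l = [] := List.eq_nil_of_length_eq_zero (Nat.le_zero.mp h)
    subst this; simp [PySem.Chars.replace.go]
  | succ fuel ih =>
    intro l acc h
    cases l with
    | nil => simp [PySem.Chars.replace.go]
    | cons c t =>
      by_cases hc : c = ','
      · subst hc
        have hpre : List.isPrefixOf [','] (',' :: t) = true := by simp [List.isPrefixOf]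
        simp only [PySem.Chars.replace.go, hpre, if_pos]
        rw [show List.drop [','].length (',' :: t) = t from rfl,
          ih t _ (by simpa using Nat.le_of_succ_le_succ h)]
        simp [pvMapC]
      · have hpre : List.isPrefixOf [','] (c :: t) = false := by
          simp [List.isPrefixOf, Ne.symm hc]
        simp only [PySem.Chars.replace.go, hpre, Bool.false_eq_true, if_false]
        rw [ih t _ (by simpa using Nat.le_of_succ_le_succ h)]
        simp [pvMapC, hc]

theorem pvReplaceEq (cs : List Char) :
    PySem.Chars.replace cs [','] ['|'] = cs.map pvMapC := by
  unfold PySem.Chars.replace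
  rw [if_neg (by simp)]
  simpa using pvReplaceGo cs.length cs [] le_rfl

-- splitOn with separator "|" is pvSplit1
theorem pvSplitOnGo (fuel : Nat) : ∀ (l : List Char) (cur : List Char) (acc : List (List Char)),
    l.length < fuel →
    PySem.Chars.splitOn.go ['|'] fuel l cur acc
      = acc.reverse ++ (pvSplit1 l).modifyHead (cur.reverse ++ ·) := by
  induction fuel with
  | zero => intro l cur acc h; exact absurd h (Nat.not_lt_zero _)
  | succ fuel ih =>
    intro l cur acc h
    cases l with
    | nil => simp [PySem.Chars.splitOn.go, pvSplit1]
    | cons c t =>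
      by_cases hc : c = '|'
      · subst hc
        have hpre : List.isPrefixOf ['|'] ('|' :: t) = true := by simp [List.isPrefixOf]
        simp only [PySem.Chars.splitOn.go, hpre, if_pos]
        rw [show List.drop ['|'].length ('|' :: t) = t from rfl,
          ih t [] _ (by simpa using Nat.lt_of_succ_lt_succ h)]
        simp [pvSplit1, pvModId]
      · have hpre : List.isPrefixOf ['|'] (c :: t) = false := by
          simp [List.isPrefixOf, Ne.symm hc]
        simp only [PySem.Chars.splitOn.go, hpre, Bool.false_eq_true, if_false]
        rw [ih t (c :: cur) acc (by simpa using Nat.lt_of_succ_lt_succ h)]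
        simp only [pvSplit1, if_neg hc, pvModMod, List.reverse_cons, List.append_assoc]
        rfl

theorem pvSplitOnEq (cs : List Char) :
    PySem.Chars.splitOn cs ['|'] = pvSplit1 cs := by
  simp only [PySem.Chars.splitOn]
  rw [pvSplitOnGo (cs.length + 1) cs [] [] (Nat.lt_succ_self _)]
  simp
  cases hs : pvSplit1 cs <;> simp

theorem pvSplit1Map (cs : List Char) : pvSplit1 (cs.map pvMapC) = pvSplitSpec cs := by
  induction cs with
  | nil => rfl
  | cons c t ih =>
    by_cases hc : c = ',' ∨ c = '|'
    · have : pvMapC c = '|' := by rcases hc with h | h <;> simp [pvMapC, h]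
      simp [pvSplit1, pvSplitSpec, this, hc, ih]
    · have h1 : pvMapC c = c := by simp [pvMapC]; intro h; exact absurd (Or.inl h) hc
      have h2 : ¬ c = '|' := fun h => hc (Or.inr h)
      have h3 : ¬ c = ',' := fun h => hc (Or.inl h)
      simp [pvSplit1, pvSplitSpec, h1, h2, h3, ih]

-- B's scanner computes pvSplitSpec as well
theorem pvScanEq (l : List Char) : ∀ (acc : List String) (buf : List Char),
    (l.foldl pvScanStep (acc, buf)).1 ++ [String.ofList (l.foldl pvScanStep (acc, buf)).2]
      = acc ++ ((pvSplitSpec l).modifyHead (buf ++ ·)).map String.ofList := by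
  induction l with
  | nil => intro acc buf; simp [pvSplitSpec]
  | cons c t ih =>
    intro acc buf
    by_cases hc : c = ',' ∨ c = '|'
    · have hstep : pvScanStep (acc, buf) c = (acc ++ [String.ofList buf], []) := by
        simp [pvScanStep, hc]
      simp only [List.foldl_cons, hstep]
      rw [ih]
      simp [pvSplitSpec, hc]
      cases hs : pvSplitSpec t <;> simp
    · have hstep : pvScanStep (acc, buf) c = (acc, buf ++ [c]) := by
        simp only [pvScanStep, if_neg hc]
      simp only [List.foldl_cons, hstep]
      rw [ih]
      simp only [pvSplitSpec, if_neg hc, pvModMod, List.append_assoc]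
      rfl

-- the head of token.split(":", 1) is takeWhile (· ≠ ':')
theorem pvSplitMaxGoZero (fuel : Nat) (l : List Char) (acc : List (List Char)) :
    PySem.Chars.splitOnMax.go [':'] fuel 0 l [] acc = acc.reverse ++ [l] := by
  cases fuel with
  | zero => simp [PySem.Chars.splitOnMax.go]
  | succ fuel => cases l <;> simp [PySem.Chars.splitOnMax.go]

theorem pvSplitMaxGo (fuel : Nat) : ∀ (l cur : List Char) (acc : List (List Char)),
    l.length < fuel →
    PySem.Chars.splitOnMax.go [':'] fuel 1 l cur acc
      = acc.reverse ++ (cur.reverse ++ l.takeWhile (· ≠ ':'))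
          :: (if (':') ∈ l then [(l.dropWhile (· ≠ ':')).tail] else []) := by
  induction fuel with
  | zero => intro l cur acc h; exact absurd h (Nat.not_lt_zero _)
  | succ fuel ih =>
    intro l cur acc h
    cases l with
    | nil => simp [PySem.Chars.splitOnMax.go]
    | cons c t =>
      by_cases hc : c = ':'
      · subst hc
        have hpre : List.isPrefixOf [':'] (':' :: t) = true := by simp [List.isPrefixOf]
        simp only [PySem.Chars.splitOnMax.go, hpre, if_pos]
        rw [if_neg (by norm_num), show List.drop [':'].length (':' :: t) = t from rfl,
          show (1 : Nat) - 1 = 0 from rfl, pvSplitMaxGoZero]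
        simp [List.takeWhile, List.dropWhile]
      · have hpre : List.isPrefixOf [':'] (c :: t) = false := by
          simp [List.isPrefixOf, Ne.symm hc]
        simp only [PySem.Chars.splitOnMax.go, hpre, Bool.false_eq_true, if_false]
        rw [if_neg (by norm_num)]
        rw [ih t (c :: cur) acc (by simpa using Nat.lt_of_succ_lt_succ h)]
        simp [List.takeWhile, List.dropWhile, hc, Ne.symm hc]

theorem pvSplitMaxEq (cs : List Char) :
    PySem.Chars.splitOnMax cs [':'] 1
      = (cs.takeWhile (· ≠ ':'))
          :: (if (':') ∈ cs then [(cs.dropWhile (· ≠ ':')).tail] else []) := by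
  unfold PySem.Chars.splitOnMax
  rw [if_neg (by norm_num), show ((1 : Int).toNat) = 1 from rfl,
    pvSplitMaxGo (cs.length + 1) cs [] [] (Nat.lt_succ_self _)]
  simp

-- per-token: A's action computation equals B's partition form
theorem pvActionEq (t : String) :
    pvActionOf t = PySem.Str.strip (String.ofList (t.toList.takeWhile (· ≠ ':'))) := by
  unfold pvActionOf
  have hcolon : (":" : String).toList = [':'] := rfl
  simp only [PySem.Str.splitMax?, PySem.Chars.splitMax?, hcolon]
  rw [if_neg (by simp)]
  rw [pvSplitMaxEq]
  by_cases h : (':') ∈ t.toList <;>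
    simp [h, PySem.List.pyGet?, PySem.List.pyIdx?]

-- A's loop keeps actions and seen in lockstep: started on the diagonal (acc, acc) it stays
-- there, and its first component is the filter/map pipeline folded through Set.add over acc.
theorem pvLoopA (l : List String) (acc : List String) :
    (l.foldl pvStepA (acc, acc)).1
    = ((((l.map PySem.Str.strip).filter
          (fun t => !(t == "" || t == "-" || t == "None"))).map pvActionOf).filter
        (fun a => a != "")).foldl PySem.Set.add acc := by
  induction l generalizing acc with
  | nil => rfl
  | cons raw l ih =>
    simp only [List.foldl_cons, List.map_cons, List.filter_cons]
    by_cases hbad : PySem.Str.strip raw = "" ∨ PySem.Str.strip raw = "-" ∨ PySem.Str.strip raw = "None"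
    · have hb : (!(PySem.Str.strip raw == "" || PySem.Str.strip raw == "-" || PySem.Str.strip raw == "None")) = false := by
        rcases hbad with h | h | h <;> simp [h]
      have hstep : pvStepA (acc, acc) raw = (acc, acc) := by
        simp [pvStepA, hbad]
      rw [hstep, hb]
      simpa using ih acc
    · have hb : (!(PySem.Str.strip raw == "" || PySem.Str.strip raw == "-" || PySem.Str.strip raw == "None")) = true := by
        push Not at hbad
        simp [hbad.1, hbad.2.1, hbad.2.2]
      rw [hb]
      simp only [if_true, List.map_cons, List.filter_cons]
      by_cases hempty : pvActionOf (PySem.Str.strip raw) = ""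
      · have hstep : pvStepA (acc, acc) raw = (acc, acc) := by
          simp [pvStepA, hbad, hempty]
        have hf : (pvActionOf (PySem.Str.strip raw) != "") = false := by simp [hempty]
        rw [hstep, hf]
        simpa using ih acc
      · have hf : (pvActionOf (PySem.Str.strip raw) != "") = true := by simp [hempty]
        rw [hf]
        simp only [if_true, List.foldl_cons]
        by_cases hseen : PySem.Set.contains acc (pvActionOf (PySem.Str.strip raw)) = true
        · have hmem : pvActionOf (PySem.Str.strip raw) ∈ acc :=
            (PySem.Set.contains_iff acc _).mp hseen
          have hstep : pvStepA (acc, acc) raw = (acc, acc) := by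
            simp [pvStepA, hbad, hempty, hmem]
          have hadd : PySem.Set.add acc (pvActionOf (PySem.Str.strip raw)) = acc := by
            simp [PySem.Set.add, hmem]
          rw [hstep, hadd]
          exact ih acc
        · have hmem : pvActionOf (PySem.Str.strip raw) ∉ acc := fun hm =>
            hseen ((PySem.Set.contains_iff acc _).mpr hm)
          have hadd : PySem.Set.add acc (pvActionOf (PySem.Str.strip raw))
              = acc ++ [pvActionOf (PySem.Str.strip raw)] := by
            simp [PySem.Set.add, hmem]
          have hstep : pvStepA (acc, acc) raw
              = (acc ++ [pvActionOf (PySem.Str.strip raw)], acc ++ [pvActionOf (PySem.Str.strip raw)]) := by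
            simp [pvStepA, hbad, hempty, hmem]
          rw [hstep, hadd]
          exact ih (acc ++ [pvActionOf (PySem.Str.strip raw)])

-- B's candidates loop is a filter-and-map
theorem pvCandEq (segs : List String) : ∀ (acc : List String),
    segs.foldl pvCandStep acc
      = acc ++ ((segs.filter (fun seg =>
            (!((pvTokenAction seg).1 == "" || (pvTokenAction seg).1 == "-" || (pvTokenAction seg).1 == "None"))
              && ((pvTokenAction seg).2 != ""))).map (fun seg => (pvTokenAction seg).2)) := by
  induction segs with
  | nil => intro acc; simp
  | cons seg segs ih =>
    intro acc
    simp only [List.foldl_cons, List.filter_cons]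
    by_cases h1 : (pvTokenAction seg).1 = "" ∨ (pvTokenAction seg).1 = "-" ∨ (pvTokenAction seg).1 = "None"
    · have hstep : pvCandStep acc seg = acc := by simp [pvCandStep, h1]
      have hb : ((!((pvTokenAction seg).1 == "" || (pvTokenAction seg).1 == "-" || (pvTokenAction seg).1 == "None"))
              && ((pvTokenAction seg).2 != "")) = false := by
        rcases h1 with h | h | h <;> simp [h]
      rw [hstep, hb]
      simpa using ih acc
    · push Not at h1
      by_cases h2 : (pvTokenAction seg).2 = ""
      · have hstep : pvCandStep acc seg = acc := by simp [pvCandStep, h1.1, h1.2.1, h1.2.2, h2]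
        have hb : ((!((pvTokenAction seg).1 == "" || (pvTokenAction seg).1 == "-" || (pvTokenAction seg).1 == "None"))
                && ((pvTokenAction seg).2 != "")) = false := by simp [h2]
        rw [hstep, hb]
        simpa using ih acc
      · have hstep : pvCandStep acc seg = acc ++ [(pvTokenAction seg).2] := by
          simp [pvCandStep, h1.1, h1.2.1, h1.2.2, h2]
        have hb : ((!((pvTokenAction seg).1 == "" || (pvTokenAction seg).1 == "-" || (pvTokenAction seg).1 == "None"))
                && ((pvTokenAction seg).2 != "")) = true := by
          simp [h1.1, h1.2.1, h1.2.2, h2]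
        rw [hstep, hb]
        simp only [if_true, List.map_cons]
        rw [ih (acc ++ [(pvTokenAction seg).2])]
        simp

-- the seen-set fold is removal-style dedup
theorem pvDedupFoldl (l : List String) : ∀ (s : List String),
    l.foldl PySem.Set.add s = s ++ pvDedup (l.filter (fun x => !(PySem.Set.contains s x))) := by
  induction l with
  | nil => intro s; simp [pvDedup]
  | cons a l ih =>
    intro s
    simp only [List.foldl_cons, List.filter_cons]
    by_cases hmem : a ∈ s
    · have hc : (!(PySem.Set.contains s a)) = false := by
        simp [hmem]
      have hadd : PySem.Set.add s a = s := by simp [PySem.Set.add, hmem]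
      rw [hadd, hc]
      simpa using ih s
    · have hc : (!(PySem.Set.contains s a)) = true := by
        simp; exact fun h => hmem ((PySem.Set.contains_iff s a).mp (by simpa [PySem.Set.contains] using h))
      have hadd : PySem.Set.add s a = s ++ [a] := by simp [PySem.Set.add, hmem]
      rw [hadd, hc]
      simp only [if_true]
      rw [ih (s ++ [a])]
      have hfil : l.filter (fun x => !(PySem.Set.contains (s ++ [a]) x))
          = (l.filter (fun x => !(PySem.Set.contains s x))).filter (fun y => y != a) := by
        rw [List.filter_filter]
        apply List.filter_congr
        intro x _
        by_cases hxa : x = a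
        · subst hxa; simp [PySem.Set.contains]
        · by_cases hxs : x ∈ s <;> simp [PySem.Set.contains, hxs, hxa]
      rw [hfil, pvDedup]
      simp

-- the two filter/map pipelines agree tokenwise
theorem pvPipeEq (segs : List String) :
    (((segs.map PySem.Str.strip).filter
        (fun t => !(t == "" || t == "-" || t == "None"))).map pvActionOf).filter
      (fun a => a != "")
    = (segs.filter (fun seg =>
          (!((pvTokenAction seg).1 == "" || (pvTokenAction seg).1 == "-" || (pvTokenAction seg).1 == "None"))
            && ((pvTokenAction seg).2 != ""))).map (fun seg => (pvTokenAction seg).2) := by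
  induction segs with
  | nil => rfl
  | cons seg segs ih =>
    have htok : (pvTokenAction seg).1 = PySem.Str.strip seg := rfl
    have hact : pvActionOf (PySem.Str.strip seg) = (pvTokenAction seg).2 := by
      simp only [pvTokenAction]
      exact pvActionEq _
    simp only [List.map_cons, List.filter_cons, htok]
    by_cases h1 : PySem.Str.strip seg = "" ∨ PySem.Str.strip seg = "-" ∨ PySem.Str.strip seg = "None"
    · have hb1 : (!(PySem.Str.strip seg == "" || PySem.Str.strip seg == "-" || PySem.Str.strip seg == "None")) = false := by
        rcases h1 with h | h | h <;> simp [h]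
      rw [hb1]
      simp only [Bool.false_and, Bool.false_eq_true, if_false]
      simpa using ih
    · push Not at h1
      have hb1 : (!(PySem.Str.strip seg == "" || PySem.Str.strip seg == "-" || PySem.Str.strip seg == "None")) = true := by
        simp [h1.1, h1.2.1, h1.2.2]
      rw [hb1]
      simp only [Bool.true_and, if_true, List.map_cons, List.filter_cons, hact]
      by_cases h2 : (pvTokenAction seg).2 = ""
      · have hb2 : ((pvTokenAction seg).2 != "") = false := by simp [h2]
        rw [hb2]
        simpa using ih
      · have hb2 : ((pvTokenAction seg).2 != "") = true := by simp [h2]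
        simp only [hb2, if_true, List.map_cons]
        exact congrArg (List.cons _) ih

-- ===== VERDICT (by name: the statement is the Claim_ definition above) =====
theorem parse_action_list_py_spec : Claim_equal_parse_action_list_py := by
  intro value _
  unfold Spec_parse_action_list_py parse_action_list_py parse_action_list_py_alt
  cases value with
  | none => rfl
  | some s =>
    by_cases h : s = "" ∨ s = "-" ∨ s = "None"
    · simp [h]
    · simp only [if_neg h]
      -- both token lists are map ofList (pvSplitSpec s.toList)
      have hsegs : (PySem.Str.split? (PySem.Str.replace s "," "|") "|").getD []
          = (pvSplitSpec s.toList).map String.ofList := by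
        simp only [PySem.Str.split?, PySem.Chars.split?]
        rw [if_neg (by simp [show ("|" : String).toList = ['|'] from rfl])]
        simp only [show ("|" : String).toList = ['|'] from rfl]
        rw [PySem.Str.toList_replace, show ("," : String).toList = [','] from rfl,
          show ("|" : String).toList = ['|'] from rfl, pvReplaceEq, pvSplitOnEq, pvSplit1Map]
        rfl
      have hscan : (s.toList.foldl pvScanStep ([], [])).1
            ++ [String.ofList (s.toList.foldl pvScanStep ([], [])).2]
          = (pvSplitSpec s.toList).map String.ofList := by
        rw [pvScanEq s.toList [] []]
        simp
        cases hs : pvSplitSpec s.toList <;> simp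
      rw [hsegs, hscan, show (PySem.Set.empty : PySem.Set String) = ([] : List String) from rfl,
        pvLoopA, pvDedupFoldl, pvCandEq]
      simp only [List.nil_append]
      congr 1
      have hid : ∀ (l : List String), l.filter (fun x => !(PySem.Set.contains ([] : List String) x)) = l := by
        intro l; simp [PySem.Set.contains]
      rw [hid]
      exact pvPipeEq _
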